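-- pv_equiv track=rewrite | github.com/Ma-chan/Python | getAddSub.py | getAddSub
-- ===== SOURCE A (Python) =====
-- def getAddSub(s):
--     b_num = ''
--     b_remain= ''
--     for i in range(0, len(s)):
--         if s[i] == '+': break
--         elif s[i] == '-': break
--         else:
--           b_num += s[i]
--           i=i+1
--         b_remain = s[i:]
--     return b_num,b_remain
-- ===== SOURCE B (Python) =====
-- import re
--
-- def getAddSub(s):
--     m = re.match(r'[^+-]+', s)
--     if m:
--         return m.group(), s[m.end():]
--     return '', ''
-- ===== Notes on version B (the rewrite author's own statement) =====
-- stated objective: idiomatic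
-- what changed: Replaces the index loop that accumulates characters one by one (and reassigns the tail slice on every step) with a single regex match of the leading run of non-sign characters, splitting the string once at the match end.
import Mathlib
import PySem

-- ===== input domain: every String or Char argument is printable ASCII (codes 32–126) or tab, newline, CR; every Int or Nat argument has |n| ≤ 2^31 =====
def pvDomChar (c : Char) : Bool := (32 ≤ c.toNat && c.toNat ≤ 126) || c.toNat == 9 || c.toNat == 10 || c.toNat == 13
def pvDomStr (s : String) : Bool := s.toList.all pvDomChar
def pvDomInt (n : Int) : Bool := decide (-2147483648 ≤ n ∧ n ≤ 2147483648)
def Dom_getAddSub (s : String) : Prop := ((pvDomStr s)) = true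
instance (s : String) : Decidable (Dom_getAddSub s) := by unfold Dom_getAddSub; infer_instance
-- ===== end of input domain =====

-- B replaces A's character-by-character index loop (which reslices the tail each step)
-- with one match of the leading run of non-sign characters, splitting the string once.
-- ===== PORT A =====
-- literal transliteration of A's for-loop: index i, accumulators b_num / b_remain,
-- break on '+' or '-', else append s[i] and set b_remain = s[i+1:] (i was incremented).
def getAddSubGo (s : List Char) (i : Nat) (num remain : List Char) : List Char × List Char :=
  if h : i < s.length then
    let c := s[i]
    if c = '+' then (num, remain)
    else if c = '-' then (num, remain)
    else getAddSubGo s (i + 1) (num ++ [c]) (s.drop (i + 1))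
  else (num, remain)
termination_by s.length - i

def getAddSub (s : String) : List String :=
  let r := getAddSubGo s.toList 0 [] []
  [String.mk r.1, String.mk r.2]

-- ===== PORT B =====
-- re.match(r'[^+-]+', s): the maximal leading run of characters that are not '+' or '-';
-- a '+' quantifier fails on an empty run, giving ('','').
def getAddSub_alt (s : String) : List String :=
  let t := s.toList.takeWhile (fun c => c != '+' && c != '-')
  if t.isEmpty then ["", ""]
  else [String.mk t, String.mk (s.toList.drop t.length)]

-- ===== PRECONDITION & SPEC =====
def Spec_getAddSub (s : String) (out : List String) : Prop := out = getAddSub_alt s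
instance (s : String) (out : List String) : Decidable (Spec_getAddSub s out) := by unfold Spec_getAddSub; infer_instance

-- ===== CLAIM (what is proved, stated in full; the proofs are below) =====
def Claim_equal_getAddSub : Prop := ∀ (s : String), Dom_getAddSub s → Spec_getAddSub s (getAddSub s)

-- ===== LEMMAS AND PROOFS =====
theorem getAddSubGo_eq (s : List Char) (i : Nat) (num remain : List Char) :
    getAddSubGo s i num remain =
      (num ++ (s.drop i).takeWhile (fun c => c != '+' && c != '-'),
       if ((s.drop i).takeWhile (fun c => c != '+' && c != '-')).isEmpty then remain
       else s.drop (i + ((s.drop i).takeWhile (fun c => c != '+' && c != '-')).length)) := by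
  fun_induction getAddSubGo s i num remain with
  | case1 i num remain h c hplus =>
      have hd : s.drop i = c :: s.drop (i + 1) := List.drop_eq_getElem_cons h
      simp [hd, hplus, List.takeWhile]
  | case2 i num remain h c hplus hminus =>
      have hd : s.drop i = c :: s.drop (i + 1) := List.drop_eq_getElem_cons h
      simp [hd, hplus, hminus, List.takeWhile]
  | case3 i num remain h c hplus hminus ih =>
      have hd : s.drop i = c :: s.drop (i + 1) := List.drop_eq_getElem_cons h
      rw [ih]
      simp only [hd, List.takeWhile]
      have hc : (c != '+' && c != '-') = true := by simp [hplus, hminus]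
      rw [hc]
      simp only [List.isEmpty_cons, List.length_cons]
      by_cases ht : ((s.drop (i+1)).takeWhile (fun c => c != '+' && c != '-')).isEmpty
      · rw [List.isEmpty_iff] at ht
        simp [ht]
      · rw [if_neg ht]
        simp only [Bool.false_eq_true, if_false, Prod.mk.injEq]
        refine ⟨by simp, ?_⟩
        congr 1
        omega
  | case4 i num remain h =>
      have hd : s.drop i = [] := List.drop_eq_nil_of_le (by omega)
      simp [hd]

-- ===== VERDICT (by name: the statement is the Claim_ definition above) =====
theorem getAddSub_spec : Claim_equal_getAddSub := by
  intro s _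
  unfold Spec_getAddSub getAddSub getAddSub_alt
  rw [getAddSubGo_eq]
  simp only [List.drop_zero, List.nil_append, Nat.zero_add]
  by_cases ht : (s.toList.takeWhile (fun c => c != '+' && c != '-')).isEmpty
  · rw [List.isEmpty_iff] at ht
    simp only [ht, List.isEmpty_nil, if_pos]
    rfl
  · simp [ht]
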